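-- pv_equiv track=rewrite | github.com/Kaichi-Irie/leetcode-python | 46_permutations_medium/step2.py | all_insertions
-- ===== SOURCE A (Python) =====
-- def all_insertions(nums: list[int], elem: int) -> list[list[int]]:
--     """
--     all_insertions returns all combinations of arrays obtained by inserting elem into nums.
--     """
--     if not nums:
--         return [[elem]]
--     all_insertions = []
--     for i in range(len(nums) + 1):
--         insertion = nums[:i] + [elem] + nums[i:]
--         all_insertions.append(insertion)
--     return all_insertions
-- ===== SOURCE B (Python) =====
-- def all_insertions(nums: list[int], elem: int) -> list[list[int]]:
--     """Threads an incremental (prefix, suffix) split instead of re-slicing nums for every i."""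
--     res = []
--     pre = []
--     suf = list(nums)
--     while True:
--         res.append(pre + [elem] + suf)
--         if not suf:
--             return res
--         pre.append(suf.pop(0))
-- ===== Notes on version B (the rewrite author's own statement) =====
-- stated objective: alternative
-- what changed: B threads an incremental prefix/suffix split across iterations (moving one element per step) instead of recomputing nums[:i]+[elem]+nums[i:] by slicing for each i, and drops A's special-case empty branch.
import Mathlib
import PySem

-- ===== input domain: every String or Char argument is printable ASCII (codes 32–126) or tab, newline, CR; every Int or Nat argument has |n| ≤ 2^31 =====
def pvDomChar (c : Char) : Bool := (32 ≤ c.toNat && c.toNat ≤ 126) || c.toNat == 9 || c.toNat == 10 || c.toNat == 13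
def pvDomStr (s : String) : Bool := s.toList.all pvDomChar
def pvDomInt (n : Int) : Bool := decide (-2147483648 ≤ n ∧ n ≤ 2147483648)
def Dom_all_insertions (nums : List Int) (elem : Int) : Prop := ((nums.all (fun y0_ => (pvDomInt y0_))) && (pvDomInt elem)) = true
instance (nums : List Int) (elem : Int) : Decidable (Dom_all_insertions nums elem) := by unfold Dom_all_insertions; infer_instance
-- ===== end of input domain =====

-- B threads an incremental prefix/suffix split instead of re-slicing nums for each i (alternative decomposition, same cost).


-- ===== PORT A =====
-- literal port: empty-branch, then for i in range(len(nums)+1): append nums[:i]+[elem]+nums[i:]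
def all_insertions (nums : List Int) (elem : Int) : List (List Int) :=
  if nums = [] then [[elem]]
  else
    (PySem.List.pyRange 0 ((nums.length : Int) + 1) 1).foldl
      (fun acc i =>
        acc ++ [PySem.List.slice nums none (some i) ++ [elem] ++ PySem.List.slice nums (some i) none])
      []

-- ===== PORT B =====
-- literal port of Source B's while-loop: state (res, pre, suf); append pre+[elem]+suf, stop when suf empty, else move head of suf to pre
def allInsAltGo (pre : List Int) (elem : Int) (suf : List Int) : List (List Int) :=
  match suf with
  | [] => [pre ++ [elem]]
  | x :: rest => (pre ++ [elem] ++ (x :: rest)) :: allInsAltGo (pre ++ [x]) elem rest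

def all_insertions_alt (nums : List Int) (elem : Int) : List (List Int) :=
  allInsAltGo [] elem nums

-- ===== PRECONDITION & SPEC =====
def Spec_all_insertions (nums : List Int) (elem : Int) (out : List (List Int)) : Prop := out = all_insertions_alt nums elem
instance (nums : List Int) (elem : Int) (out : List (List Int)) : Decidable (Spec_all_insertions nums elem out) := by unfold Spec_all_insertions; infer_instance

-- ===== CLAIM (what is proved, stated in full; the proofs are below) =====
def Claim_equal_all_insertions : Prop := ∀ (nums : List Int) (elem : Int), Dom_all_insertions nums elem → Spec_all_insertions nums elem (all_insertions nums elem)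

-- ===== LEMMAS AND PROOFS =====

-- foldl-append over a list is a map
theorem pv_foldl_append_map {α β : Type} (f : α → β) (l : List α) (acc : List β) :
    l.foldl (fun a i => a ++ [f i]) acc = acc ++ l.map f := by
  induction l generalizing acc with
  | nil => simp
  | cons x xs ih => simp [List.foldl, ih]

-- B's loop computes the map of insert-at-i over range (suf.length + 1), prefixed by pre
theorem pv_altGo_eq (elem : Int) (suf : List Int) : ∀ pre : List Int,
    allInsAltGo pre elem suf =
      (List.range (suf.length + 1)).map (fun i => pre ++ suf.take i ++ elem :: suf.drop i) := by
  induction suf with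
  | nil => intro pre; simp [allInsAltGo, List.range_succ]
  | cons x rest ih =>
    intro pre
    rw [List.range_succ_eq_map]
    simp only [allInsAltGo, ih (pre ++ [x]), List.map_cons, List.map_map]
    refine congrArg₂ List.cons ?_ ?_
    · simp
    · apply List.map_congr_left
      intro i _
      simp [List.take_succ_cons, List.drop_succ_cons]

theorem pv_alt_eq_map (nums : List Int) (elem : Int) :
    all_insertions_alt nums elem =
      (List.range (nums.length + 1)).map (fun i => nums.take i ++ elem :: nums.drop i) := by
  simpa using pv_altGo_eq elem nums []

-- ===== VERDICT (by name: the statement is the Claim_ definition above) =====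
theorem all_insertions_spec : Claim_equal_all_insertions := by
  intro nums elem _
  unfold Spec_all_insertions all_insertions
  rw [pv_alt_eq_map]
  by_cases h : nums = []
  · subst h; simp
  · rw [if_neg h]
    have hr : PySem.List.pyRange 0 ((nums.length : Int) + 1) 1
        = (List.range (nums.length + 1)).map (fun k : Nat => (k : Int)) := by
      have := PySem.List.pyRange_one 0 ((nums.length : Int) + 1)
      simpa using this
    rw [hr, List.foldl_map, pv_foldl_append_map]
    simp only [List.nil_append]
    apply List.map_congr_left
    intro i _
    rw [PySem.List.slice_to_natCast, PySem.List.slice_from_natCast]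
    simp
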